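-- pv_equiv track=rewrite | github.com/ZhangSenxin/Deamination-HTS-Pipeline | motif_extract_2.0.py | extract_motif
-- ===== SOURCE A (Python) =====
-- def extract_motif(sequence_, motif_, extract_1=12, extract_2=False, chr_=''):
--     n_ = len(motif_[0])
--     if not extract_2:
--         extract_2 = extract_1
--
--     start = extract_1
--     end = int(len(sequence_)) - (extract_2 + n_ - 1)
--
--     result_ = []
--     for i_ in range(start, end):
--         mot = sequence_[i_: i_ + n_]
--         if mot in motif_:
--             seq_out = sequence_[i_ - extract_1: i_ + extract_2 + n_]
--             seq_left = seq_out[: extract_1]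
--             seq_mid = seq_out[extract_1: extract_1 + n_]
--             seq_right = seq_out[extract_1 + n_:]
--
--             result_ += [[seq_left, seq_mid, seq_right, chr_]]
--
--     return result_
-- ===== SOURCE B (Python) =====
-- def extract_motif(sequence_, motif_, extract_1=12, extract_2=False, chr_=''):
--     n_ = len(motif_[0])
--     e2 = extract_2 if extract_2 else extract_1
--     start = extract_1
--     end = len(sequence_) - (e2 + n_ - 1)
--     hits = []
--     seen = set()
--     for m in motif_:
--         if len(m) == n_ and m not in seen:
--             seen.add(m)
--             hits += [(i, m) for i in range(start, end) if sequence_[i:i + n_] == m]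
--     hits.sort(key=lambda h: h[0])
--     return [[sequence_[i - extract_1:i], m, sequence_[i + n_:i + e2 + n_], chr_]
--             for i, m in hits]
-- ===== Notes on version B (the rewrite author's own statement) =====
-- stated objective: alternative
-- what changed: Inverts the loop structure: instead of A's per-position scan that tests each window by membership in the motif list, B runs one occurrence scan per DISTINCT motif of the right length, collects (position, motif) pairs, merges them by sorting on position, and emits each row with direct slices of sequence_ instead of A's slice-then-reslice of seq_out; Pre_ excludes empty motif lists (A raises IndexError) and negative extract widths whose scan range is nonempty, malformed window sizes where A's value is negative-index slice wraparound (empty-range inputs stay admitted: both return []).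
-- outside the precondition, e.g. on extract_motif('abcab', ['ab'], -1, 1, 'c'): A returns [['b', '', 'c', 'c']], B returns [['', 'ab', 'c', 'c']]
import Mathlib
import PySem

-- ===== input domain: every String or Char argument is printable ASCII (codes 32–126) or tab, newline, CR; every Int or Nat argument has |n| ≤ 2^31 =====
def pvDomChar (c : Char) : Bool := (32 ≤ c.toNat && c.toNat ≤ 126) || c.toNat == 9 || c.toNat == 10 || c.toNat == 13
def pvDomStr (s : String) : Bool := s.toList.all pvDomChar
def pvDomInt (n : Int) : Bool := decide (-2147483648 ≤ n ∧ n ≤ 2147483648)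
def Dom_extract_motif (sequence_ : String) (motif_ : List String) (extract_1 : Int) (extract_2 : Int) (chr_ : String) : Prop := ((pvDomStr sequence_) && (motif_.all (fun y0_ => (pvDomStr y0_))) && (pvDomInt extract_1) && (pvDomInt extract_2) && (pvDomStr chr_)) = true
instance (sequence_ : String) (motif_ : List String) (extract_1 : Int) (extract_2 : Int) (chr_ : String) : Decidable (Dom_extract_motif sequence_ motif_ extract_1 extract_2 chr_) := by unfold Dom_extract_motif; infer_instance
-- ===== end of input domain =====

-- B inverts the loop order: one occurrence scan per DISTINCT motif of the right length, collected as
-- (position, motif) pairs and merged by sorting on position, with direct slices of sequence_ instead of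
-- A's slice-then-reslice of seq_out ('alternative' objective; return values proved equal on Pre_).

-- ===== PORT A =====
def extract_motif (sequence_ : String) (motif_ : List String) (extract_1 : Int) (extract_2 : Int) (chr_ : String) : List (List String) :=
  match PySem.List.pyGet? motif_ 0 with
  | none => []  -- motif_[0] raises IndexError on an empty motif list; excluded by Pre_
  | some m0 =>
    let n_ : Int := PySem.Str.len m0
    let extract_2 : Int := if extract_2 == 0 then extract_1 else extract_2
    let start : Int := extract_1
    let end_ : Int := PySem.Str.len sequence_ - (extract_2 + n_ - 1)
    (PySem.List.pyRange start end_ 1).foldl (fun result_ i_ =>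
      let mot := PySem.Str.slice sequence_ (some i_) (some (i_ + n_))
      if motif_.contains mot then
        let seq_out := PySem.Str.slice sequence_ (some (i_ - extract_1)) (some (i_ + extract_2 + n_))
        let seq_left := PySem.Str.slice seq_out none (some extract_1)
        let seq_mid := PySem.Str.slice seq_out (some extract_1) (some (extract_1 + n_))
        let seq_right := PySem.Str.slice seq_out (some (extract_1 + n_)) none
        result_ ++ [[seq_left, seq_mid, seq_right, chr_]]
      else result_) []

-- ===== PORT B =====
def extract_motif_alt (sequence_ : String) (motif_ : List String) (extract_1 : Int) (extract_2 : Int) (chr_ : String) : List (List String) :=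
  match PySem.List.pyGet? motif_ 0 with
  | none => []  -- motif_[0] raises IndexError on an empty motif list; excluded by Pre_
  | some m0 =>
    let n_ : Int := PySem.Str.len m0
    let e2 : Int := if extract_2 == 0 then extract_1 else extract_2
    let start : Int := extract_1
    let end_ : Int := PySem.Str.len sequence_ - (e2 + n_ - 1)
    let hits : List (Int × String) :=
      (motif_.foldl (fun (st : PySem.Set String × List (Int × String)) m =>
        if PySem.Str.len m == n_ && !(PySem.Set.contains st.1 m) then
          (PySem.Set.add st.1 m,
           st.2 ++ ((PySem.List.pyRange start end_ 1).filter
               (fun i => PySem.Str.slice sequence_ (some i) (some (i + n_)) == m)).map (fun i => (i, m)))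
        else st) (PySem.Set.empty, [])).2
    (PySem.List.sorted hits (fun h => h.1)).map (fun h =>
      [PySem.Str.slice sequence_ (some (h.1 - extract_1)) (some h.1), h.2,
       PySem.Str.slice sequence_ (some (h.1 + n_)) (some (h.1 + e2 + n_)), chr_])

-- ===== PRECONDITION & SPEC =====
-- Pre_ excludes motif_ = [] (A raises IndexError there) and negative extract widths: a negative
-- extract_1/extract_2 is a malformed window size outside the task's natural domain, where A's value
-- comes from Python's negative-index slice wraparound; inputs whose scan range is empty (end ≤ start)
-- stay admitted, since no window is ever cut there.
def Pre_extract_motif (sequence_ : String) (motif_ : List String) (extract_1 : Int) (extract_2 : Int) (chr_ : String) : Prop :=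
  motif_ ≠ [] ∧
    ((0 ≤ extract_1 ∧ 0 ≤ extract_2) ∨
      PySem.Str.len sequence_ -
        ((if extract_2 = 0 then extract_1 else extract_2) + PySem.Str.len (motif_.headD "") - 1) ≤ extract_1)
instance (sequence_ : String) (motif_ : List String) (extract_1 : Int) (extract_2 : Int) (chr_ : String) : Decidable (Pre_extract_motif sequence_ motif_ extract_1 extract_2 chr_) := by unfold Pre_extract_motif; infer_instance
def pvWitness_extract_motif : String × List String × Int × Int × String := ("aabaa", ["ab"], 1, 1, "x")

def Spec_extract_motif (sequence_ : String) (motif_ : List String) (extract_1 : Int) (extract_2 : Int) (chr_ : String) (out : List (List String)) : Prop := out = extract_motif_alt sequence_ motif_ extract_1 extract_2 chr_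
instance (sequence_ : String) (motif_ : List String) (extract_1 : Int) (extract_2 : Int) (chr_ : String) (out : List (List String)) : Decidable (Spec_extract_motif sequence_ motif_ extract_1 extract_2 chr_ out) := by unfold Spec_extract_motif; infer_instance

-- ===== CLAIM (what is proved, stated in full; the proofs are below) =====
def Claim_equal_extract_motif : Prop := ∀ (sequence_ : String) (motif_ : List String) (extract_1 : Int) (extract_2 : Int) (chr_ : String), Dom_extract_motif sequence_ motif_ extract_1 extract_2 chr_ → Pre_extract_motif sequence_ motif_ extract_1 extract_2 chr_ → Spec_extract_motif sequence_ motif_ extract_1 extract_2 chr_ (extract_motif sequence_ motif_ extract_1 extract_2 chr_)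

-- ===== LEMMAS AND PROOFS =====

-- the unsorted (position, motif) pairs B's motif loop accumulates, as a structural recursion
def pvHits (S : String) (lo hi n : Int) : List String → PySem.Set String → List (Int × String)
  | [], _ => []
  | m :: ms, s =>
    if PySem.Str.len m == n && !(PySem.Set.contains s m) then
      ((PySem.List.pyRange lo hi 1).filter
          (fun i => PySem.Str.slice S (some i) (some (i + n)) == m)).map (fun i => (i, m))
        ++ pvHits S lo hi n ms (PySem.Set.add s m)
    else pvHits S lo hi n ms s

lemma pvHits_foldl (S : String) (lo hi n : Int) (ms : List String) (s : PySem.Set String) (acc : List (Int × String)) :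
    (ms.foldl (fun (st : PySem.Set String × List (Int × String)) m =>
        if PySem.Str.len m == n && !(PySem.Set.contains st.1 m) then
          (PySem.Set.add st.1 m,
           st.2 ++ ((PySem.List.pyRange lo hi 1).filter
               (fun i => PySem.Str.slice S (some i) (some (i + n)) == m)).map (fun i => (i, m)))
        else st) (s, acc)).2 = acc ++ pvHits S lo hi n ms s := by
  induction ms generalizing s acc with
  | nil => simp [pvHits]
  | cons m ms ih =>
      simp only [List.foldl_cons, pvHits]
      by_cases h : (PySem.Str.len m == n && !(PySem.Set.contains s m)) = true
      · rw [if_pos h, if_pos h, ih]; simp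
      · rw [if_neg h, if_neg h, ih]

lemma mem_pvHits (S : String) (lo hi n : Int) (ms : List String) (s : PySem.Set String) (i : Int) (m : String) :
    (i, m) ∈ pvHits S lo hi n ms s ↔
      m ∈ ms ∧ m ∉ s ∧ PySem.Str.len m = n ∧ i ∈ PySem.List.pyRange lo hi 1 ∧
        PySem.Str.slice S (some i) (some (i + n)) = m := by
  induction ms generalizing s with
  | nil => simp [pvHits]
  | cons m' ms ih =>
      simp only [pvHits]
      by_cases h : (PySem.Str.len m' == n && !(PySem.Set.contains s m')) = true
      · rw [if_pos h]
        simp only [Bool.and_eq_true, beq_iff_eq, Bool.not_eq_true', PySem.Set.contains,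
          List.contains_eq_mem, decide_eq_false_iff_not] at h
        obtain ⟨hlen, hns⟩ := h
        simp only [List.mem_append, List.mem_map, List.mem_filter, beq_iff_eq, ih,
          PySem.Set.mem_add, List.mem_cons, Prod.mk.injEq]
        constructor
        · rintro (⟨i', ⟨hi', hsl⟩, rfl, rfl⟩ | ⟨hm, hns', hl, hr, hsl⟩)
          · exact ⟨Or.inl rfl, hns, hlen, hi', hsl⟩
          · exact ⟨Or.inr hm, fun hin => hns' (Or.inl hin), hl, hr, hsl⟩
        · rintro ⟨hm | hm, hns', hl, hr, hsl⟩
          · exact Or.inl ⟨i, ⟨hr, by rw [hsl, hm]⟩, rfl, hm.symm⟩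
          · by_cases hmm : m = m'
            · exact Or.inl ⟨i, ⟨hr, by rw [hsl, hmm]⟩, rfl, hmm.symm⟩
            · exact Or.inr ⟨hm, fun hin => hin.elim hns' hmm, hl, hr, hsl⟩
      · rw [if_neg h]
        simp only [Bool.and_eq_true, beq_iff_eq, Bool.not_eq_true', PySem.Set.contains,
          List.contains_eq_mem, decide_eq_false_iff_not, not_and, not_not] at h
        rw [ih]
        simp only [List.mem_cons]
        constructor
        · rintro ⟨hm, hns, hl, hr, hsl⟩; exact ⟨Or.inr hm, hns, hl, hr, hsl⟩
        · rintro ⟨hm | hm, hns, hl, hr, hsl⟩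
          · exact absurd (h (hm ▸ hl)) (hm ▸ hns)
          · exact ⟨hm, hns, hl, hr, hsl⟩

lemma nodup_pvHits (S : String) (lo hi n : Int) (ms : List String) (s : PySem.Set String) :
    (pvHits S lo hi n ms s).Nodup := by
  induction ms generalizing s with
  | nil => simp [pvHits]
  | cons m' ms ih =>
      simp only [pvHits]
      by_cases h : (PySem.Str.len m' == n && !(PySem.Set.contains s m')) = true
      · rw [if_pos h]
        refine List.Nodup.append ?_ (ih _) ?_
        · exact ((PySem.List.nodup_pyRange_one lo hi).filter _).map
            (fun a b hab => congrArg Prod.fst hab)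
        · rintro ⟨i, m⟩ hocc hhits
          simp only [List.mem_map, List.mem_filter] at hocc
          obtain ⟨i', _, _, rfl⟩ := hocc
          have := ((mem_pvHits S lo hi n ms _ i m').mp hhits).2.1
          exact this ((PySem.Set.mem_add s m' m').mpr (Or.inr rfl))
      · rw [if_neg h]; exact ih _

lemma pv_len_slice (S : String) (i n : Int) (h0 : 0 ≤ i) (hn : 0 ≤ n)
    (hle : i + n ≤ (S.toList.length : Int)) :
    PySem.Str.len (PySem.Str.slice S (some i) (some (i + n))) = n := by
  rw [PySem.Str.len_eq, PySem.Str.toList_slice, PySem.Chars.slice_eq_listSlice,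
    PySem.List.slice_toNat _ h0 (by omega)]
  simp only [List.length_take, List.length_drop]
  omega

lemma pv_take_drop_eq (SL : List Char) (a b a' b' : Nat) (ha : a = a') (hb : b = b') :
    List.take a (List.drop b SL) = List.take a' (List.drop b' SL) := by rw [ha, hb]

lemma pv_slices_eq (S : String) (i e1 e2 n : Int) (he1 : 0 ≤ e1) (he2 : 0 ≤ e2) (hn : 0 ≤ n)
    (hi : e1 ≤ i) :
    PySem.Str.slice (PySem.Str.slice S (some (i - e1)) (some (i + e2 + n))) none (some e1)
        = PySem.Str.slice S (some (i - e1)) (some i) ∧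
    PySem.Str.slice (PySem.Str.slice S (some (i - e1)) (some (i + e2 + n))) (some e1) (some (e1 + n))
        = PySem.Str.slice S (some i) (some (i + n)) ∧
    PySem.Str.slice (PySem.Str.slice S (some (i - e1)) (some (i + e2 + n))) (some (e1 + n)) none
        = PySem.Str.slice S (some (i + n)) (some (i + e2 + n)) := by
  have h0 : (0:Int) ≤ i - e1 := by omega
  refine ⟨String.ext ?_, String.ext ?_, String.ext ?_⟩ <;>
    simp only [PySem.Str.toList_slice, PySem.Chars.slice_eq_listSlice,
      PySem.List.slice_toNat _ h0 (by omega : (0:Int) ≤ i + e2 + n),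
      PySem.List.slice_toNat _ h0 (by omega : (0:Int) ≤ i),
      PySem.List.slice_to _ (by omega : (0:Int) ≤ e1),
      PySem.List.slice_from _ (by omega : (0:Int) ≤ e1 + n),
      PySem.List.slice_toNat _ (by omega : (0:Int) ≤ e1) (by omega : (0:Int) ≤ e1 + n),
      PySem.List.slice_toNat _ (by omega : (0:Int) ≤ i) (by omega : (0:Int) ≤ i + n),
      PySem.List.slice_toNat _ (by omega : (0:Int) ≤ i + n) (by omega : (0:Int) ≤ i + e2 + n),
      List.take_take, List.drop_take, List.drop_drop]
  · exact pv_take_drop_eq _ _ _ _ _ (by omega) rfl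
  · exact pv_take_drop_eq _ _ _ _ _ (by omega) (by omega)
  · exact pv_take_drop_eq _ _ _ _ _ (by omega) (by omega)

lemma pvHits_nil (S : String) (lo hi n : Int) (ms : List String) (s : PySem.Set String)
    (hr : PySem.List.pyRange lo hi 1 = []) : pvHits S lo hi n ms s = [] := by
  induction ms generalizing s with
  | nil => rfl
  | cons m ms ih => simp [pvHits, hr, ih]

lemma pvCore (S m0 : String) (rest : List String) (e1 E2 : Int) (chr_ : String)
    (he1 : 0 ≤ e1) (hE2 : 0 ≤ E2) :
    (PySem.List.pyRange e1 (PySem.Str.len S - (E2 + PySem.Str.len m0 - 1)) 1).foldl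
      (fun result_ i_ =>
        if (m0 :: rest).contains (PySem.Str.slice S (some i_) (some (i_ + PySem.Str.len m0))) then
          result_ ++ [[PySem.Str.slice (PySem.Str.slice S (some (i_ - e1)) (some (i_ + E2 + PySem.Str.len m0))) none (some e1),
                       PySem.Str.slice (PySem.Str.slice S (some (i_ - e1)) (some (i_ + E2 + PySem.Str.len m0))) (some e1) (some (e1 + PySem.Str.len m0)),
                       PySem.Str.slice (PySem.Str.slice S (some (i_ - e1)) (some (i_ + E2 + PySem.Str.len m0))) (some (e1 + PySem.Str.len m0)) none,
                       chr_]]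
        else result_) []
    = (PySem.List.sorted
         (pvHits S e1 (PySem.Str.len S - (E2 + PySem.Str.len m0 - 1)) (PySem.Str.len m0)
           (m0 :: rest) PySem.Set.empty) (fun h => h.1)).map
        (fun h => [PySem.Str.slice S (some (h.1 - e1)) (some h.1), h.2,
                   PySem.Str.slice S (some (h.1 + PySem.Str.len m0)) (some (h.1 + E2 + PySem.Str.len m0)), chr_]) := by
  have hn : (0:Int) ≤ PySem.Str.len m0 := by rw [PySem.Str.len_eq]; exact Int.natCast_nonneg _
  have hLen : PySem.Str.len S = (S.toList.length : Int) := PySem.Str.len_eq S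
  have hbnd : ∀ i : Int, i ∈ PySem.List.pyRange e1 (PySem.Str.len S - (E2 + PySem.Str.len m0 - 1)) 1 →
      e1 ≤ i ∧ 0 ≤ i ∧ i + E2 + PySem.Str.len m0 ≤ (S.toList.length : Int) := by
    intro i hi
    have := PySem.List.mem_pyRange_one.mp hi
    omega
  have hslen : ∀ i : Int, i ∈ PySem.List.pyRange e1 (PySem.Str.len S - (E2 + PySem.Str.len m0 - 1)) 1 →
      PySem.Str.len (PySem.Str.slice S (some i) (some (i + PySem.Str.len m0))) = PySem.Str.len m0 := by
    intro i hi
    obtain ⟨h1, h2, h3⟩ := hbnd i hi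
    exact pv_len_slice S i _ h2 hn (by omega)
  have hinj : Function.Injective (fun i : Int => (i, PySem.Str.slice S (some i) (some (i + PySem.Str.len m0)))) :=
    fun a b h => congrArg Prod.fst h
  have hnd : (((PySem.List.pyRange e1 (PySem.Str.len S - (E2 + PySem.Str.len m0 - 1)) 1).filter
        (fun i_ => (m0 :: rest).contains (PySem.Str.slice S (some i_) (some (i_ + PySem.Str.len m0))))).map
        (fun i => (i, PySem.Str.slice S (some i) (some (i + PySem.Str.len m0))))).Nodup :=
    List.Nodup.map hinj (((PySem.List.nodup_pyRange_one _ _).filter _))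
  have hperm : (((PySem.List.pyRange e1 (PySem.Str.len S - (E2 + PySem.Str.len m0 - 1)) 1).filter
        (fun i_ => (m0 :: rest).contains (PySem.Str.slice S (some i_) (some (i_ + PySem.Str.len m0))))).map
        (fun i => (i, PySem.Str.slice S (some i) (some (i + PySem.Str.len m0))))).Perm
      (pvHits S e1 (PySem.Str.len S - (E2 + PySem.Str.len m0 - 1)) (PySem.Str.len m0)
        (m0 :: rest) PySem.Set.empty) := by
    rw [List.perm_ext_iff_of_nodup hnd (nodup_pvHits _ _ _ _ _ _)]
    rintro ⟨i, m⟩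
    rw [mem_pvHits]
    simp only [List.mem_map, List.mem_filter, List.contains_iff_mem, Prod.mk.injEq]
    constructor
    · rintro ⟨i', ⟨hir, hmem⟩, rfl, rfl⟩
      exact ⟨hmem, by simp [PySem.Set.empty], hslen i' hir, hir, rfl⟩
    · rintro ⟨hm, _, hlm, hir, hsl⟩
      exact ⟨i, ⟨hir, by rw [hsl]; exact hm⟩, rfl, hsl⟩
  have hpl : (((PySem.List.pyRange e1 (PySem.Str.len S - (E2 + PySem.Str.len m0 - 1)) 1).filter
        (fun i_ => (m0 :: rest).contains (PySem.Str.slice S (some i_) (some (i_ + PySem.Str.len m0))))).map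
        (fun i => (i, PySem.Str.slice S (some i) (some (i + PySem.Str.len m0))))).Pairwise
      (fun a b => a.1 < b.1) :=
    List.Pairwise.map _ (fun a b h => h)
      ((PySem.List.pairwise_lt_pyRange_one _ _).filter _)
  rw [PySem.List.sorted_eq_of_perm_of_pairwise_lt _ _ _ hperm hpl]
  rw [PySem.List.foldl_append_if
        (p := fun i_ => (m0 :: rest).contains (PySem.Str.slice S (some i_) (some (i_ + PySem.Str.len m0))))
        (f := fun i_ => [PySem.Str.slice (PySem.Str.slice S (some (i_ - e1)) (some (i_ + E2 + PySem.Str.len m0))) none (some e1),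
                       PySem.Str.slice (PySem.Str.slice S (some (i_ - e1)) (some (i_ + E2 + PySem.Str.len m0))) (some e1) (some (e1 + PySem.Str.len m0)),
                       PySem.Str.slice (PySem.Str.slice S (some (i_ - e1)) (some (i_ + E2 + PySem.Str.len m0))) (some (e1 + PySem.Str.len m0)) none,
                       chr_])]
  rw [List.nil_append, List.map_map]
  refine List.map_congr_left ?_
  intro i hif
  have hir : i ∈ PySem.List.pyRange e1 (PySem.Str.len S - (E2 + PySem.Str.len m0 - 1)) 1 :=
    List.mem_of_mem_filter hif
  obtain ⟨h1, h2, h3⟩ := hbnd i hir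
  obtain ⟨hl, hm, hr⟩ := pv_slices_eq S i e1 E2 (PySem.Str.len m0) he1 hE2 hn h1
  simp only [Function.comp_apply]
  rw [hl, hm, hr]

lemma pvCoreAll (S m0 : String) (rest : List String) (e1 E2 : Int) (chr_ : String)
    (h : (0 ≤ e1 ∧ 0 ≤ E2) ∨ PySem.Str.len S - (E2 + PySem.Str.len m0 - 1) ≤ e1) :
    (PySem.List.pyRange e1 (PySem.Str.len S - (E2 + PySem.Str.len m0 - 1)) 1).foldl
      (fun result_ i_ =>
        if (m0 :: rest).contains (PySem.Str.slice S (some i_) (some (i_ + PySem.Str.len m0))) then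
          result_ ++ [[PySem.Str.slice (PySem.Str.slice S (some (i_ - e1)) (some (i_ + E2 + PySem.Str.len m0))) none (some e1),
                       PySem.Str.slice (PySem.Str.slice S (some (i_ - e1)) (some (i_ + E2 + PySem.Str.len m0))) (some e1) (some (e1 + PySem.Str.len m0)),
                       PySem.Str.slice (PySem.Str.slice S (some (i_ - e1)) (some (i_ + E2 + PySem.Str.len m0))) (some (e1 + PySem.Str.len m0)) none,
                       chr_]]
        else result_) []
    = (PySem.List.sorted
         (pvHits S e1 (PySem.Str.len S - (E2 + PySem.Str.len m0 - 1)) (PySem.Str.len m0)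
           (m0 :: rest) PySem.Set.empty) (fun h => h.1)).map
        (fun h => [PySem.Str.slice S (some (h.1 - e1)) (some h.1), h.2,
                   PySem.Str.slice S (some (h.1 + PySem.Str.len m0)) (some (h.1 + E2 + PySem.Str.len m0)), chr_]) := by
  rcases h with ⟨he1, hE2⟩ | hemp
  · exact pvCore S m0 rest e1 E2 chr_ he1 hE2
  · have hnil : PySem.List.pyRange e1 (PySem.Str.len S - (E2 + PySem.Str.len m0 - 1)) 1 = [] :=
      PySem.List.pyRange_one_eq_nil hemp
    rw [hnil, pvHits_nil S e1 _ _ _ _ hnil]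
    simp [PySem.List.sorted_eq_nil_iff]

-- ===== VERDICT (by name: the statement is the Claim_ definition above) =====
theorem extract_motif_spec : Claim_equal_extract_motif := by
  intro S motif_ e1 e2 chr_ _ hpre
  obtain ⟨hne, hrest⟩ := hpre
  unfold Spec_extract_motif
  cases motif_ with
  | nil => exact absurd rfl hne
  | cons m0 rest =>
    simp only [List.headD_cons] at hrest
    have hget : PySem.List.pyGet? (m0 :: rest) (0:Int) = some m0 := by
      simp [PySem.List.pyGet?, PySem.List.pyIdx?]
    simp only [extract_motif, extract_motif_alt, hget]
    by_cases h2 : (e2 == (0:Int)) = true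
    · have h2' : e2 = 0 := by simpa using h2
      simp only [if_pos h2]
      rw [pvHits_foldl, List.nil_append]
      refine pvCoreAll S m0 rest e1 e1 chr_ ?_
      rcases hrest with ⟨ha, _⟩ | hb
      · exact Or.inl ⟨ha, ha⟩
      · rw [if_pos h2'] at hb; exact Or.inr hb
    · have h2' : ¬ e2 = 0 := by simpa using h2
      simp only [if_neg h2]
      rw [pvHits_foldl, List.nil_append]
      refine pvCoreAll S m0 rest e1 e2 chr_ ?_
      rcases hrest with ⟨ha, hb⟩ | hb
      · exact Or.inl ⟨ha, hb⟩
      · rw [if_neg h2'] at hb; exact Or.inr hb
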